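-- pv_equiv track=rewrite | github.com/Kukkis66/mooc-ohjelmointi-2023-jatko | osa08-01_pienin_keskiarvo/src/pienin_keskiarvo.py | pienin_keskiarvo
-- ===== SOURCE A (Python) =====
-- def pienin_keskiarvo(henkilo1: dict, henkilo2: dict, henkilo3: dict):
--     arvot = ["tulos1", "tulos2","tulos3"]
--
--     res1 = [henkilo1[i] for i in arvot if i in henkilo1]
--     res2 = [henkilo2[i] for i in arvot if i in henkilo2]
--     res3 = [henkilo3[i] for i in arvot if i in henkilo3]
--     if sum(res1) < sum(res2) and sum(res1) < sum(res3):
--         return henkilo1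
--     elif sum(res2) < sum(res3) and sum(res2) < sum(res1):
--         return henkilo2
--     elif sum(res3) < sum(res2) and sum(res3) < sum(res1):
--         return henkilo3
-- ===== SOURCE B (Python) =====
-- def pienin_keskiarvo(henkilo1: dict, henkilo2: dict, henkilo3: dict):
--     arvot = ["tulos1", "tulos2", "tulos3"]
--     pairs = []
--     for henkilo in (henkilo1, henkilo2, henkilo3):
--         s = sum(henkilo[k] for k in arvot if k in henkilo)
--         pairs.append((s, henkilo))
--     pairs.sort(key=lambda p: p[0])
--     if pairs[0][0] < pairs[1][0]:
--         return pairs[0][1]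
--     return None
-- ===== Notes on version B (the rewrite author's own statement) =====
-- stated objective: simpler
-- what changed: Replaces A's three pairwise if/elif sum comparisons by building (sum, person) pairs, stably sorting them by sum, and returning the head person only when its sum is strictly below the second's (tie -> None).
import Mathlib
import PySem

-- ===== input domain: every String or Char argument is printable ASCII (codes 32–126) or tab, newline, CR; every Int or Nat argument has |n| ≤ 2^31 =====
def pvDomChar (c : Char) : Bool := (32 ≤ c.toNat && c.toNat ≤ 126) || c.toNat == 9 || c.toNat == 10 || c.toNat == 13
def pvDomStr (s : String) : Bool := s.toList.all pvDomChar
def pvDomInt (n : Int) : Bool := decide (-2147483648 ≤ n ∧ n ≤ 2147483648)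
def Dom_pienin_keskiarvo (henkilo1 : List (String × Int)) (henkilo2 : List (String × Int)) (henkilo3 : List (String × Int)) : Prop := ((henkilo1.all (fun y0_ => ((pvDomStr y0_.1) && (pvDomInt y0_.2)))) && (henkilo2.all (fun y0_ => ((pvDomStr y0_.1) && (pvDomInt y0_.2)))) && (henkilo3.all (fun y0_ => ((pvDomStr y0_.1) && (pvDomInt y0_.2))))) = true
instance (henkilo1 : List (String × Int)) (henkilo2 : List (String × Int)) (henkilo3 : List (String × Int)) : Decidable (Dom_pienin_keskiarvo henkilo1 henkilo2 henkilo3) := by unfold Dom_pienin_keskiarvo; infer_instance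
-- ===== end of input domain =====

-- B replaces A's three pairwise if/elif comparisons by a stable sort of (sum, person)
-- pairs and one adjacent strict comparison; objective: simpler.

-- ===== PORT A =====
-- dict lookup (first match in the association list), exact for Python dict semantics
def pvGet (d : List (String × Int)) (k : String) : Option Int :=
  (d.find? (fun p => p.1 == k)).map (·.2)

-- [henkilo[i] for i in arvot if i in henkilo]
def pvRes (d : List (String × Int)) : List Int :=
  (["tulos1", "tulos2", "tulos3"].filter (fun i => (pvGet d i).isSome)).map
    (fun i => (pvGet d i).getD 0)

def pienin_keskiarvo (henkilo1 : List (String × Int)) (henkilo2 : List (String × Int)) (henkilo3 : List (String × Int)) : Option (List (String × Int)) :=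
  let res1 := pvRes henkilo1
  let res2 := pvRes henkilo2
  let res3 := pvRes henkilo3
  if res1.sum < res2.sum ∧ res1.sum < res3.sum then some henkilo1
  else if res2.sum < res3.sum ∧ res2.sum < res1.sum then some henkilo2
  else if res3.sum < res2.sum ∧ res3.sum < res1.sum then some henkilo3
  else none

-- ===== PORT B =====
-- sum(henkilo[k] for k in arvot if k in henkilo)
def pvSumma (d : List (String × Int)) : Int :=
  ["tulos1", "tulos2", "tulos3"].foldl
    (fun acc k => match (d.find? (fun p => p.1 == k)) with
      | some p => acc + p.2
      | none => acc) 0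

def pienin_keskiarvo_alt (henkilo1 : List (String × Int)) (henkilo2 : List (String × Int)) (henkilo3 : List (String × Int)) : Option (List (String × Int)) :=
  let pairs := [henkilo1, henkilo2, henkilo3].map (fun h => (pvSumma h, h))
  match PySem.List.sorted pairs (fun p => p.1) false with
  | p0 :: p1 :: _ => if p0.1 < p1.1 then some p0.2 else none
  | _ => none

-- ===== PRECONDITION & SPEC =====
def Spec_pienin_keskiarvo (henkilo1 : List (String × Int)) (henkilo2 : List (String × Int)) (henkilo3 : List (String × Int)) (out : Option (List (String × Int))) : Prop := out = pienin_keskiarvo_alt henkilo1 henkilo2 henkilo3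
instance (henkilo1 : List (String × Int)) (henkilo2 : List (String × Int)) (henkilo3 : List (String × Int)) (out : Option (List (String × Int))) : Decidable (Spec_pienin_keskiarvo henkilo1 henkilo2 henkilo3 out) := by unfold Spec_pienin_keskiarvo; infer_instance

-- ===== CLAIM (what is proved, stated in full; the proofs are below) =====
def Claim_equal_pienin_keskiarvo : Prop := ∀ (henkilo1 : List (String × Int)) (henkilo2 : List (String × Int)) (henkilo3 : List (String × Int)), Dom_pienin_keskiarvo henkilo1 henkilo2 henkilo3 → Spec_pienin_keskiarvo henkilo1 henkilo2 henkilo3 (pienin_keskiarvo henkilo1 henkilo2 henkilo3)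

-- ===== LEMMAS AND PROOFS =====

-- A's sum over the filtered value list equals B's accumulating fold over the keys.
theorem sum_pvRes_eq_pvSumma (d : List (String × Int)) : (pvRes d).sum = pvSumma d := by
  simp only [pvRes, pvSumma, pvGet]
  rcases h1 : d.find? (fun p => p.1 == "tulos1") with _ | p1 <;>
  rcases h2 : d.find? (fun p => p.1 == "tulos2") with _ | p2 <;>
  rcases h3 : d.find? (fun p => p.1 == "tulos3") with _ | p3 <;>
    (simp [List.filter, List.foldl, h1, h2, h3]; try ring)

-- The sort-then-compare-adjacent logic agrees with the three-way if/elif chain.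
theorem core_eq (a b c : Int) (h1 h2 h3 : List (String × Int)) :
    (if a < b ∧ a < c then some h1
     else if b < c ∧ b < a then some h2
     else if c < b ∧ c < a then some h3
     else none)
    = (match PySem.List.sorted [(a, h1), (b, h2), (c, h3)] (fun p => p.1) false with
       | p0 :: p1 :: _ => if p0.1 < p1.1 then some p0.2 else none
       | _ => none) := by
  simp only [PySem.List.sorted, List.foldl, Bool.false_eq_true, if_false]
  by_cases hab : a < b <;> by_cases hac : a < c <;> by_cases hbc : b < c <;>
    by_cases hba : b < a <;> by_cases hca : c < a <;> by_cases hcb : c < b <;>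
    first
      | omega
      | (simp [PySem.List.insertBy, hab, hac, hbc, hba, hca, hcb]; try omega)

-- ===== VERDICT (by name: the statement is the Claim_ definition above) =====
theorem pienin_keskiarvo_spec : Claim_equal_pienin_keskiarvo := by
  intro henkilo1 henkilo2 henkilo3 _
  unfold Spec_pienin_keskiarvo pienin_keskiarvo pienin_keskiarvo_alt
  simp only [List.map, sum_pvRes_eq_pvSumma]
  exact core_eq (pvSumma henkilo1) (pvSumma henkilo2) (pvSumma henkilo3) henkilo1 henkilo2 henkilo3
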